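-- pv_equiv track=rewrite | github.com/BryanLee030621/LKC-FYP | test_tool.py | merge_visual_results
-- ===== SOURCE A (Python) =====
-- def merge_visual_results(raw_detections):
--     """Groups consecutive detections of same text into start/end chunks."""
--     if not raw_detections: return []
--     merged = []
--     curr = None
--     for det in raw_detections:
--         if curr is None:
--             curr = {"start": det['time'], "end": det['time'], "text": det['text']}
--         elif det['text'] == curr['text']:
--             curr['end'] = det['time']
--         else:
--             merged.append(curr)
--             curr = {"start": det['time'], "end": det['time'], "text": det['text']}
--     if curr: merged.append(curr)
--     return merged
-- ===== SOURCE B (Python) =====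
-- def merge_visual_results(raw_detections):
--     """Groups consecutive detections of same text into start/end chunks
--     by scanning each maximal run of equal texts with two indices."""
--     merged = []
--     i = 0
--     n = len(raw_detections)
--     while i < n:
--         text = raw_detections[i]['text']
--         j = i
--         while j < n and raw_detections[j]['text'] == text:
--             j += 1
--         times = [raw_detections[k]['time'] for k in range(i, j)]
--         merged.append({"start": times[0], "end": times[-1], "text": text})
--         i = j
--     return merged
-- ===== Notes on version B (the rewrite author's own statement) =====
-- stated objective: alternative
-- what changed: Replaces A's stateful curr-dict accumulator (create/extend/flush on text change) by a two-index run scanner that finds each maximal run of equal texts and emits its chunk directly from the run's first and last detection.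
-- outside the precondition, e.g. on merge_visual_results([{'time': '1'}]): A raises KeyError, B raises KeyError
import Mathlib
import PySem

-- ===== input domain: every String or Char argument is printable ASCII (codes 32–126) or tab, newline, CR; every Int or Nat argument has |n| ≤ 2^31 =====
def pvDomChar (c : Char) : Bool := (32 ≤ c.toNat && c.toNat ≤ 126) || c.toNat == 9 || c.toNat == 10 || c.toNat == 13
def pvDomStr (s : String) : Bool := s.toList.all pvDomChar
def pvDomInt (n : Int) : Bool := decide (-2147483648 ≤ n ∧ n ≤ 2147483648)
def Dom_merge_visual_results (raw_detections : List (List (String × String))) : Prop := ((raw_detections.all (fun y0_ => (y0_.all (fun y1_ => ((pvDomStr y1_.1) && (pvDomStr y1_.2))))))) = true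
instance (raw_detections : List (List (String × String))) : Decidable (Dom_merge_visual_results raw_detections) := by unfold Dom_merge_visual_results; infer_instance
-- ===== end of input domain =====

-- B replaces A's stateful curr-dict accumulator (create / extend / flush on text change)
-- by a run scanner that splits off each maximal run of equal texts and emits its chunk
-- from the run's first and last times directly (objective: alternative, same cost).


-- ===== PORT A =====
-- det['time'] / det['text']: first-match dict lookup; Pre_ guarantees the keys are
-- present (Python's KeyError is excluded by Pre_), so the getD default is never used.
def pvTime (d : List (String × String)) : String := (PySem.Dict.mk d).getD "time" ""

def pvText (d : List (String × String)) : String := (PySem.Dict.mk d).getD "text" ""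

-- the for-loop of A, state = (merged, curr)
def mvrLoop : List (List (String × String)) → List (List (String × String)) →
    Option (List (String × String)) → List (List (String × String))
  | [], merged, curr =>
      -- "if curr: merged.append(curr)" — curr, when not None, is a 3-entry dict, hence truthy
      match curr with
      | none => merged
      | some c => merged ++ [c]
  | det :: rest, merged, curr =>
      match curr with
      | none => mvrLoop rest merged (some [("start", pvTime det), ("end", pvTime det), ("text", pvText det)])
      | some c =>
          if pvText det == (PySem.Dict.mk c).getD "text" "" then
            mvrLoop rest merged (some (((PySem.Dict.mk c).insert "end" (pvTime det)).items)
)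
          else
            mvrLoop rest (merged ++ [c]) (some [("start", pvTime det), ("end", pvTime det), ("text", pvText det)])

def merge_visual_results (raw_detections : List (List (String × String))) : List (List (String × String)) :=
  if raw_detections = [] then [] else mvrLoop raw_detections [] none

-- ===== PORT B =====
-- the outer while-loop of B: split off the maximal run of detections sharing the
-- first detection's text (the inner index scan = takeWhile/dropWhile), emit its chunk.
def mvrRuns : List (List (String × String)) → List (List (String × String))
  | [] => []
  | d :: rest =>
      let t := pvText d
      let run := d :: rest.takeWhile (fun x => pvText x == t)
      let times := run.map pvTime
      [("start", times.headD ""), ("end", times.getLastD ""), ("text", t)] ::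
        mvrRuns (rest.dropWhile (fun x => pvText x == t))
  termination_by l => l.length
  decreasing_by
    simp only [List.length_cons]
    exact Nat.lt_succ_of_le (List.length_dropWhile_le _ _)

def merge_visual_results_alt (raw_detections : List (List (String × String))) : List (List (String × String)) :=
  mvrRuns raw_detections

-- ===== PRECONDITION & SPEC =====
-- Pre_ excludes exactly the inputs on which Python A raises KeyError:
-- every detection must carry both a 'time' and a 'text' key.
def Pre_merge_visual_results (raw_detections : List (List (String × String))) : Prop :=
  (raw_detections.all (fun d => ((PySem.Dict.mk d).get? "time").isSome && ((PySem.Dict.mk d).get? "text").isSome)) = true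

instance (raw_detections : List (List (String × String))) : Decidable (Pre_merge_visual_results raw_detections) := by unfold Pre_merge_visual_results; infer_instance

def pvWitness_merge_visual_results : (List (List (String × String))) :=
  [[("time", "1"), ("text", "a")], [("time", "2"), ("text", "a")], [("time", "3"), ("text", "b")]]

def Spec_merge_visual_results (raw_detections : List (List (String × String))) (out : List (List (String × String))) : Prop := out = merge_visual_results_alt raw_detections
instance (raw_detections : List (List (String × String))) (out : List (List (String × String))) : Decidable (Spec_merge_visual_results raw_detections out) := by unfold Spec_merge_visual_results; infer_instance

-- ===== CLAIM (what is proved, stated in full; the proofs are below) =====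
def Claim_equal_merge_visual_results : Prop := ∀ (raw_detections : List (List (String × String))), Dom_merge_visual_results raw_detections → Pre_merge_visual_results raw_detections → Spec_merge_visual_results raw_detections (merge_visual_results raw_detections)

-- ===== LEMMAS AND PROOFS =====

lemma mvrRuns_cons (d : List (String × String)) (rest : List (List (String × String))) :
    mvrRuns (d :: rest) =
      [("start", ((d :: rest.takeWhile (fun x => pvText x == pvText d)).map pvTime).headD ""),
       ("end", ((d :: rest.takeWhile (fun x => pvText x == pvText d)).map pvTime).getLastD ""),
       ("text", pvText d)] :: mvrRuns (rest.dropWhile (fun x => pvText x == pvText d)) := by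
  rw [mvrRuns.eq_def]

lemma lastTime_cons (l : List (List (String × String))) (det : List (String × String)) (e : String) :
    (pvTime det :: l.map pvTime).getLast?.getD e = pvTime (l.getLast?.getD det) := by
  rw [← List.getLastD_eq_getLast?, List.getLastD_cons, List.getLastD_eq_getLast?, List.getLast?_map]
  cases l.getLast? <;> simp

lemma dict_getD_text (s e t : String) :
    (PySem.Dict.mk [("start",s),("end",e),("text",t)]).getD "text" "" = t := by
  simp [PySem.Dict.getD, PySem.Dict.get?_mk_cons]

lemma dict_insert_end (s e t v : String) :
    ((PySem.Dict.mk [("start",s),("end",e),("text",t)]).insert "end" v).items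
      = [("start",s),("end",v),("text",t)] := by
  simp [PySem.Dict.insert]

-- the loop invariant: running A's loop with an open chunk (s, e, t) produces that chunk
-- extended by the run of text t at the head of rest, followed by B's runs of the remainder.
lemma mvrLoop_some (rest : List (List (String × String))) :
    ∀ (merged : List (List (String × String))) (s e t : String),
    mvrLoop rest merged (some [("start",s),("end",e),("text",t)]) =
      merged ++ ([("start", s),
                  ("end", ((rest.takeWhile (fun x => pvText x == t)).map pvTime).getLastD e),
                  ("text", t)] :: mvrRuns (rest.dropWhile (fun x => pvText x == t))) := by
  induction rest with
  | nil => intro merged s e t; simp [mvrLoop, mvrRuns]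
  | cons det rest ih =>
      intro merged s e t
      by_cases h : pvText det = t
      · rw [mvrLoop, dict_getD_text]
        simp only [h, BEq.rfl, if_true, dict_insert_end]
        rw [ih merged s (pvTime det) t]
        simp only [List.takeWhile_cons, List.dropWhile_cons, h, BEq.rfl, if_true, List.map_cons,
          List.getLastD_cons]
      · have hb : (pvText det == t) = false := by simp [h]
        rw [mvrLoop, dict_getD_text]
        simp only [hb, Bool.false_eq_true, if_false]
        rw [ih (merged ++ [[("start",s),("end",e),("text",t)]]) (pvTime det) (pvTime det) (pvText det)]
        simp only [List.takeWhile_cons, List.dropWhile_cons, hb, Bool.false_eq_true, if_false,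
          List.map_nil, List.getLastD_nil]
        rw [mvrRuns_cons]
        simp [lastTime_cons]

-- ===== VERDICT (by name: the statement is the Claim_ definition above) =====
theorem merge_visual_results_spec : Claim_equal_merge_visual_results := by
  intro raw _ _
  unfold Spec_merge_visual_results merge_visual_results merge_visual_results_alt
  cases raw with
  | nil => simp [mvrRuns]
  | cons d rest =>
      simp only [reduceCtorEq, if_false]
      rw [mvrLoop, mvrLoop_some, mvrRuns_cons]
      simp [lastTime_cons]
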